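-- pv_equiv track=rewrite | github.com/Smookii/Maze-Path-Finding | AStar.py | TraceLineBeetweenPoints
-- ===== SOURCE A (Python) =====
-- def TraceLineBeetweenPoints(pos, reversePos, wallsize):
--     tabPosPix = []
--     vect = [0,0]
--     for i in range(0,2):
--         if pos[i] < reversePos[i]:
--             vect[i] = 1
--         elif pos[i] > reversePos[i]:
--             vect[i] = -1
--         else:
--             vect[i] = 0
--     for i in range(0, wallsize):
--         newPos = [pos[0] + vect[0], pos[1] + vect[1]]
--         tabPosPix.append(newPos)
--         pos = newPos
--     return tabPosPix
-- ===== SOURCE B (Python) =====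
-- def TraceLineBeetweenPoints(pos, reversePos, wallsize):
--     vx = (reversePos[0] > pos[0]) - (reversePos[0] < pos[0])
--     vy = (reversePos[1] > pos[1]) - (reversePos[1] < pos[1])
--     return [[pos[0] + i * vx, pos[1] + i * vy] for i in range(1, wallsize + 1)]
-- ===== Notes on version B (the rewrite author's own statement) =====
-- stated objective: simpler
-- what changed: Replaces A's running-accumulator loop (each point built from the previous point) with a stateless closed-form comprehension that builds point i directly as pos + i*vect.
import Mathlib
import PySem

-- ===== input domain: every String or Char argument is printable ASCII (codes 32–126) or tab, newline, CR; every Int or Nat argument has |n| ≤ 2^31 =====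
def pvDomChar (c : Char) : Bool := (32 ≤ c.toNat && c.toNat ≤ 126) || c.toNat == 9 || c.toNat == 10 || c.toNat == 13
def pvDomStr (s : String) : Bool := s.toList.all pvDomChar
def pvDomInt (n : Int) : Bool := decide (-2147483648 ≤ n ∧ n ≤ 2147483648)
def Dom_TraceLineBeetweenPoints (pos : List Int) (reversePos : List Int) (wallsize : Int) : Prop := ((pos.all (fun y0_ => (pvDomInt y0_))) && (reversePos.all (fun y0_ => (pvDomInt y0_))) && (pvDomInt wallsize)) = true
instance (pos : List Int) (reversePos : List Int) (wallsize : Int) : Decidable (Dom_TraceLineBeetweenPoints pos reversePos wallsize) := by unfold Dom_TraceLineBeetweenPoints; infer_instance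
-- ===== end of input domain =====

-- ===== PORT A =====
-- B is simpler: A's running-accumulator loop is replaced by a stateless closed-form comprehension.
-- A's per-coordinate direction: the unrolled body of A's 'for i in range(0,2)' loop.
def pvVectA (pos : List Int) (reversePos : List Int) (i : Nat) : Int :=
  if pos.getD i 0 < reversePos.getD i 0 then 1
  else if pos.getD i 0 > reversePos.getD i 0 then -1
  else 0

-- A's second loop: append newPos, then pos := newPos; exact on inputs with 2 ≤ pos.length (Pre_).
def pvLoopA (pos : List Int) (v0 v1 : Int) : Nat → List (List Int)
  | 0 => []
  | n + 1 =>
      let newPos := [pos.getD 0 0 + v0, pos.getD 1 0 + v1]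
      newPos :: pvLoopA newPos v0 v1 n

def TraceLineBeetweenPoints (pos : List Int) (reversePos : List Int) (wallsize : Int) : List (List Int) :=
  pvLoopA pos (pvVectA pos reversePos 0) (pvVectA pos reversePos 1) wallsize.toNat

-- ===== PORT B =====
def TraceLineBeetweenPoints_alt (pos : List Int) (reversePos : List Int) (wallsize : Int) : List (List Int) :=
  let vx : Int := (if reversePos.getD 0 0 > pos.getD 0 0 then 1 else 0) -
                  (if reversePos.getD 0 0 < pos.getD 0 0 then 1 else 0)
  let vy : Int := (if reversePos.getD 1 0 > pos.getD 1 0 then 1 else 0) -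
                  (if reversePos.getD 1 0 < pos.getD 1 0 then 1 else 0)
  (PySem.List.pyRange 1 (wallsize + 1) 1).map
    (fun i => [pos.getD 0 0 + i * vx, pos.getD 1 0 + i * vy])

-- ===== PRECONDITION & SPEC =====
-- Pre_ excludes exactly the inputs where A raises IndexError: both point lists need length ≥ 2.
def Pre_TraceLineBeetweenPoints (pos : List Int) (reversePos : List Int) (wallsize : Int) : Prop :=
  2 ≤ pos.length ∧ 2 ≤ reversePos.length
instance (pos : List Int) (reversePos : List Int) (wallsize : Int) : Decidable (Pre_TraceLineBeetweenPoints pos reversePos wallsize) := by unfold Pre_TraceLineBeetweenPoints; infer_instance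

def pvWitness_TraceLineBeetweenPoints : List Int × List Int × Int := ([0, 0], [3, 0], 3)

def Spec_TraceLineBeetweenPoints (pos : List Int) (reversePos : List Int) (wallsize : Int) (out : List (List Int)) : Prop := out = TraceLineBeetweenPoints_alt pos reversePos wallsize
instance (pos : List Int) (reversePos : List Int) (wallsize : Int) (out : List (List Int)) : Decidable (Spec_TraceLineBeetweenPoints pos reversePos wallsize out) := by unfold Spec_TraceLineBeetweenPoints; infer_instance

-- ===== CLAIM (what is proved, stated in full; the proofs are below) =====
def Claim_equal_TraceLineBeetweenPoints : Prop := ∀ (pos : List Int) (reversePos : List Int) (wallsize : Int), Dom_TraceLineBeetweenPoints pos reversePos wallsize → Pre_TraceLineBeetweenPoints pos reversePos wallsize → Spec_TraceLineBeetweenPoints pos reversePos wallsize (TraceLineBeetweenPoints pos reversePos wallsize)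

-- ===== LEMMAS AND PROOFS =====

-- A's loop from current point (a,b) yields the closed-form points a+(k+1)*v0, b+(k+1)*v1.
theorem pvLoopA_closed (n : Nat) : ∀ (a b v0 v1 : Int),
    pvLoopA [a, b] v0 v1 n =
      (List.range n).map (fun (k : Nat) => [a + ((k : Int) + 1) * v0, b + ((k : Int) + 1) * v1]) := by
  induction n with
  | zero => intro a b v0 v1; rfl
  | succ m ih =>
      intro a b v0 v1
      rw [List.range_succ_eq_map]
      simp only [pvLoopA, List.map_cons, List.map_map, List.getD]
      rw [ih]
      congr 1
      · norm_num
      · apply List.map_congr_left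
        intro k _
        simp only [Function.comp, List.getD, List.getElem?_cons_zero, List.getElem?_cons_succ, Option.getD_some]
        congr 1 <;> [skip; congr 1] <;> push_cast <;> ring

theorem TraceLineBeetweenPoints_spec : Claim_equal_TraceLineBeetweenPoints := by
  intro pos reversePos wallsize _ hpre
  obtain ⟨hp, _⟩ := hpre
  obtain ⟨a, pos, hp2⟩ : ∃ x xs, pos = x :: xs := by
    cases pos with | nil => simp at hp | cons x xs => exact ⟨x, xs, rfl⟩
  obtain ⟨b, rest, hp3⟩ : ∃ x xs, pos = x :: xs := by
    subst hp2; cases pos with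
    | nil => simp at hp
    | cons x xs => exact ⟨x, xs, rfl⟩
  subst hp2 hp3
  unfold Spec_TraceLineBeetweenPoints TraceLineBeetweenPoints TraceLineBeetweenPoints_alt
  have hv0 : pvVectA (a :: b :: rest) reversePos 0 =
      (if reversePos.getD 0 0 > a then 1 else 0) - (if reversePos.getD 0 0 < a then (1:Int) else 0) := by
    simp only [pvVectA, List.getD]
    rcases lt_trichotomy a (reversePos.getD 0 0) with h | h | h <;>
      simp [h, not_lt_of_gt, le_of_eq] <;> omega
  have hv1 : pvVectA (a :: b :: rest) reversePos 1 =
      (if reversePos.getD 1 0 > b then 1 else 0) - (if reversePos.getD 1 0 < b then (1:Int) else 0) := by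
    simp only [pvVectA, List.getD]
    rcases lt_trichotomy b (reversePos.getD 1 0) with h | h | h <;>
      simp [h, not_lt_of_gt, le_of_eq] <;> omega
  -- reduce A's loop on (a :: b :: rest): first step only reads indices 0,1, so rest is irrelevant
  have hstart : ∀ (v0 v1 : Int) (n : Nat),
      pvLoopA (a :: b :: rest) v0 v1 n = pvLoopA [a, b] v0 v1 n := by
    intro v0 v1 n; cases n with
    | zero => rfl
    | succ m => simp [pvLoopA, List.getD]
  rw [hstart, pvLoopA_closed, hv0, hv1, PySem.List.pyRange_one]
  have hlen : (wallsize + 1 - 1).toNat = wallsize.toNat := by omega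
  rw [hlen, List.map_map]
  apply List.map_congr_left
  intro k _
  simp only [Function.comp, List.getD, List.getElem?_cons_zero, List.getElem?_cons_succ, Option.getD_some]
  congr 1 <;> [skip; congr 1] <;> ring
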